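-- pv_equiv track=rewrite | github.com/B0RJA/pomelo | Zest/v1_2/firmware/httpFiles/file2array.py | bytes2string
-- ===== SOURCE A (Python) =====
-- def bytes2string(data, elem_per_line=64, indent_level=4, indent_symbol=" "):
--     """
--     converts bytes to formated c-style code
--     """
--     lines = list()
--     line = str()
--
--     for start in range(0, len(data), elem_per_line):
--         line = indent_symbol * indent_level
--         line += ", ".join(map("0x{0:02x}".format, data[start:start + elem_per_line]))
--         lines.append(line)
--
--     return ",\n".join(lines)
-- ===== SOURCE B (Python) =====
-- def bytes2string(data, elem_per_line=64, indent_level=4, indent_symbol=" "):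
--     """
--     converts bytes to formated c-style code
--     """
--     if elem_per_line <= 0:
--         raise ValueError("elem_per_line must be positive")
--     indent = indent_symbol * indent_level
--     pieces = []
--     for i, byte in enumerate(data):
--         if i == 0:
--             pieces.append(indent)
--         elif i % elem_per_line == 0:
--             pieces.append(",\n" + indent)
--         else:
--             pieces.append(", ")
--         pieces.append("0x{0:02x}".format(byte))
--     return "".join(pieces)
-- ===== Notes on version B (the rewrite author's own statement) =====
-- stated objective: alternative
-- what changed: Replaces A's chunked strategy (slice the data into elem_per_line blocks via range(0,len,step), build one indented line per block, join lines with ',\n') with a single flat enumerate pass that emits, per element, a separator chosen by i % elem_per_line and the hex token.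
-- outside the precondition, e.g. on bytes2string([1], -1, 0, ' '): A returns '', B raises ValueError
import Mathlib
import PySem

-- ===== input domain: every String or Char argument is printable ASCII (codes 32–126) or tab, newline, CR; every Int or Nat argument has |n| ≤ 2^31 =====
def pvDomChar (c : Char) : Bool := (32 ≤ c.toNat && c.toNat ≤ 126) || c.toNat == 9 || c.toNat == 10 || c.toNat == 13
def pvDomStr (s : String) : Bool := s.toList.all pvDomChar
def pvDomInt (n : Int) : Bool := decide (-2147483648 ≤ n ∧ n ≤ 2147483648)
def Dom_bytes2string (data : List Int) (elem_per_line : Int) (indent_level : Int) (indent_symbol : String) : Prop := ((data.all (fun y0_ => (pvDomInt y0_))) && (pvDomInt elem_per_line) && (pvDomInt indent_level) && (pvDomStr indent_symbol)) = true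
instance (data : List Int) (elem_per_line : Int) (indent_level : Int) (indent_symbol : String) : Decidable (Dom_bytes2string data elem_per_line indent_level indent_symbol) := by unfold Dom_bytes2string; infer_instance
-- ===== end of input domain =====

-- B: one flat enumerate pass choosing each token's separator by i % elem_per_line, instead of
-- A's slicing into per-line chunks that are joined twice; same cost, different decomposition.


-- "0x{0:02x}".format(b), ported by hand (PySem has no hex formatter): lowercase hex digits of |b|
-- via Nat.toDigits 16, sign in front, zero-padded to width 2 with Python's sign-aware zfill; exact
-- for every int (both ports use this same helper, as both Pythons use the same format call).
def pvTok (n : Int) : List Char :=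
  '0' :: 'x' ::
    PySem.Chars.zfill (if n < 0 then '-' :: Nat.toDigits 16 n.natAbs else Nat.toDigits 16 n.toNat) 2

-- ===== PORT A =====
def bytes2string (data : List Int) (elem_per_line : Int) (indent_level : Int) (indent_symbol : String) : String :=
  let lines : List (List Char) :=
    (PySem.List.pyRange 0 (PySem.List.len data) elem_per_line).foldl
      (fun lines start =>
        let line := PySem.List.pyRepeat indent_symbol.toList indent_level
        let line := line ++ PySem.Chars.join (", ".toList)
          ((PySem.List.slice data (some start) (some (start + elem_per_line))).map pvTok)
        lines ++ [line]) []
  String.mk (PySem.Chars.join (",\n".toList) lines)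

-- ===== PORT B =====
def bytes2string_alt (data : List Int) (elem_per_line : Int) (indent_level : Int) (indent_symbol : String) : String :=
  if elem_per_line ≤ 0 then ""   -- Python B raises ValueError here; outside Pre_
  else
    let indent := PySem.List.pyRepeat indent_symbol.toList indent_level
    String.mk ((PySem.List.enumerate data).foldl
      (fun acc p =>
        acc ++ (if p.1 = 0 then indent
                else if PySem.Int.mod p.1 elem_per_line = 0 then ",\n".toList ++ indent
                else ", ".toList) ++ pvTok p.2) [])

-- ===== PRECONDITION & SPEC =====
-- Pre_ excludes elem_per_line ≤ 0, outside the function's natural domain: at 0 A raises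
-- ValueError (zero range step); for negative values A's empty output is an accident of
-- range(), and B's own validation raises ValueError on both.
def Pre_bytes2string (data : List Int) (elem_per_line : Int) (indent_level : Int) (indent_symbol : String) : Prop :=
  0 < elem_per_line
instance (data : List Int) (elem_per_line : Int) (indent_level : Int) (indent_symbol : String) : Decidable (Pre_bytes2string data elem_per_line indent_level indent_symbol) := by unfold Pre_bytes2string; infer_instance

def pvWitness_bytes2string : List Int × Int × Int × String := ([0, 255, 16], 2, 4, " ")

def Spec_bytes2string (data : List Int) (elem_per_line : Int) (indent_level : Int) (indent_symbol : String) (out : String) : Prop := out = bytes2string_alt data elem_per_line indent_level indent_symbol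
instance (data : List Int) (elem_per_line : Int) (indent_level : Int) (indent_symbol : String) (out : String) : Decidable (Spec_bytes2string data elem_per_line indent_level indent_symbol out) := by unfold Spec_bytes2string; infer_instance

-- ===== CLAIM (what is proved, stated in full; the proofs are below) =====
def Claim_equal_bytes2string : Prop := ∀ (data : List Int) (elem_per_line : Int) (indent_level : Int) (indent_symbol : String), Dom_bytes2string data elem_per_line indent_level indent_symbol → Pre_bytes2string data elem_per_line indent_level indent_symbol → Spec_bytes2string data elem_per_line indent_level indent_symbol (bytes2string data elem_per_line indent_level indent_symbol)

-- ===== LEMMAS AND PROOFS =====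

def pvChunks (e' : Nat) : List Int → List (List Int)
  | [] => []
  | x :: xs => (x :: xs).take (e' + 1) :: pvChunks e' ((x :: xs).drop (e' + 1))
termination_by l => l.length
decreasing_by simp

lemma pvChunks_cons (e' : Nat) (data : List Int) (h : data ≠ []) :
    pvChunks e' data = data.take (e' + 1) :: pvChunks e' (data.drop (e' + 1)) := by
  cases data with
  | nil => exact absurd rfl h
  | cons x xs => simp [pvChunks]

lemma pvSlice_nonneg {α : Type} (xs : List α) (s t : Int) (hs : 0 ≤ s) (ht : 0 ≤ t) :
    PySem.List.slice xs (some s) (some t) = (xs.drop s.toNat).take (t.toNat - s.toNat) := by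
  simp only [PySem.List.slice, PySem.List.clampIdx]
  rw [if_neg (by omega), if_neg (by omega)]
  by_cases hs' : s.toNat ≤ xs.length
  · rw [min_eq_left hs']
    rw [List.take_eq_take_iff]
    simp only [List.length_drop]
    omega
  · rw [min_eq_right (Nat.le_of_not_le hs')]
    rw [List.drop_length, List.drop_eq_nil_of_le (Nat.le_of_not_le hs')]
    simp

lemma pvRange_pos_cons (e b : Int) (he : 0 < e) (hb : 0 < b) :
    PySem.List.pyRange 0 b e = 0 :: (PySem.List.pyRange 0 (b - e) e).map (· + e) := by
  rw [PySem.List.pyRange_of_pos _ _ he, PySem.List.pyRange_of_pos _ _ he]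
  rw [if_pos hb]
  have hc : ((b - 0 + e - 1) / e).toNat = (if 0 < b - e then ((b - e - 0 + e - 1) / e).toNat else 0) + 1 := by
    by_cases h : 0 < b - e
    · rw [if_pos h]
      have h2 : (b - 0 + e - 1) = (b - e - 0 + e - 1) + 1 * e := by ring
      rw [h2, Int.add_mul_ediv_right _ _ (by omega : e ≠ 0),
        Int.toNat_add (Int.ediv_nonneg (by omega) (by omega)) (by omega)]
      rfl
    · rw [if_neg h]
      have h2 : (b - 0 + e - 1) = (b - 1) + 1 * e := by ring
      rw [h2, Int.add_mul_ediv_right _ _ (by omega : e ≠ 0),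
        Int.ediv_eq_zero_of_lt (by omega) (by omega)]
      rfl
  rw [hc, List.range_succ_eq_map]
  simp [List.map_map, Function.comp]
  intro a _
  ring

lemma pvRange_pos_nil (e b : Int) (he : 0 < e) (hb : b ≤ 0) :
    PySem.List.pyRange 0 b e = [] := by
  rw [PySem.List.pyRange_of_pos _ _ he, if_neg (by omega)]
  simp

lemma pvA_chunks (e : Int) (he : 0 < e) (ind cm : List Char) :
    ∀ data : List Int,
      (PySem.List.pyRange 0 (data.length : Int) e).map
        (fun s => ind ++ PySem.Chars.join cm
          ((PySem.List.slice data (some s) (some (s + e))).map pvTok))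
      = (pvChunks (e.toNat - 1) data).map
          (fun c => ind ++ PySem.Chars.join cm (c.map pvTok)) := by
  have main : ∀ (n : Nat) (data : List Int), data.length ≤ n →
      (PySem.List.pyRange 0 (data.length : Int) e).map
        (fun s => ind ++ PySem.Chars.join cm
          ((PySem.List.slice data (some s) (some (s + e))).map pvTok))
      = (pvChunks (e.toNat - 1) data).map
          (fun c => ind ++ PySem.Chars.join cm (c.map pvTok)) := by
    intro n
    induction n with
    | zero =>
      intro data h
      have : data = [] := List.eq_nil_of_length_eq_zero (Nat.le_zero.mp h)
      subst this
      simp [pvChunks, pvRange_pos_nil e 0 he le_rfl]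
    | succ n ih =>
      intro data h
      by_cases hnil : data = []
      · subst hnil
        simp [pvChunks, pvRange_pos_nil e 0 he le_rfl]
      · have hlen : 0 < data.length := List.length_pos_of_ne_nil hnil
        rw [pvRange_pos_cons e _ he (by exact_mod_cast hlen)]
        rw [pvChunks_cons _ _ hnil, List.map_cons, List.map_cons, List.map_map]
        have he1 : e.toNat - 1 + 1 = e.toNat := by omega
        congr 1
        · -- head chunk
          rw [zero_add, pvSlice_nonneg data 0 e le_rfl (by omega)]
          rw [he1]
          simp
        · -- tail
          have hdrop := ih (data.drop e.toNat) (by simp; omega)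
          rw [he1]
          by_cases hsmall : data.length ≤ e.toNat
          · rw [List.drop_eq_nil_of_le hsmall] at hdrop ⊢
            rw [pvRange_pos_nil e _ he (by push_cast; omega)]
            simp [pvChunks]
          · have hlen2 : ((data.drop e.toNat).length : Int) = (data.length : Int) - e := by
              simp; omega
            rw [hlen2] at hdrop
            rw [← hdrop]
            apply List.map_congr_left
            intro s hs
            have hs0 : 0 ≤ s := ((PySem.List.mem_pyRange_iff_of_pos he s).mp hs).1
            simp only [Function.comp]
            rw [pvSlice_nonneg data (s + e) (s + e + e) (by omega) (by omega),
              pvSlice_nonneg (data.drop e.toNat) s (s + e) hs0 (by omega)]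
            have h1 : (s + e).toNat = s.toNat + e.toNat := by omega
            have h2 : (s + e + e).toNat - (s.toNat + e.toNat) = e.toNat := by omega
            have h3 : s.toNat + e.toNat - s.toNat = e.toNat := by omega
            rw [h1, h2, h3, List.drop_drop, Nat.add_comm s.toNat e.toNat]
  intro data
  exact main data.length data le_rfl

lemma pvJoin_cons (sep x : List Char) (xs : List (List Char)) :
    PySem.Chars.join sep (x :: xs) = x ++ (xs.map (fun y => sep ++ y)).flatten := by
  induction xs generalizing x with
  | nil => simp [PySem.Chars.join, List.intercalate]
  | cons y ys ih =>
    rw [PySem.Chars.join_cons_cons, ih y]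
    simp

lemma pvB_inner (e : Int) (ind cm nl : List Char) (c : List Int) :
    ∀ (s : Int) (acc : List Char),
      (∀ i : Int, s ≤ i → i < s + c.length → ¬ (i = 0) ∧ ¬ (PySem.Int.mod i e = 0)) →
      (PySem.List.enumerate c s).foldl
        (fun acc p =>
          acc ++ (if p.1 = 0 then ind
                  else if PySem.Int.mod p.1 e = 0 then nl ++ ind
                  else cm) ++ pvTok p.2) acc
      = acc ++ (c.map (fun b => cm ++ pvTok b)).flatten := by
  induction c with
  | nil => intro s acc h; simp [PySem.List.enumerate]
  | cons x xs ih =>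
    intro s acc h
    rw [PySem.List.enumerate_cons, List.foldl_cons]
    have hx := h s le_rfl (by simp only [List.length_cons]; push_cast; omega)
    have h' : ∀ i : Int, s + 1 ≤ i → i < s + 1 + (xs.length : Int) →
        ¬ (i = 0) ∧ ¬ (PySem.Int.mod i e = 0) := by
      intro i h1 h2
      exact h i (by omega) (by simp only [List.length_cons]; push_cast; omega)
    rw [if_neg hx.1, if_neg hx.2]
    rw [ih (s + 1) _ h']
    simp

lemma pvB_chunks (e : Int) (he : 0 < e) (ind cm nl : List Char) :
    ∀ (data : List Int), ∀ (k : Nat) (acc : List Char),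
      (PySem.List.enumerate data (e * (k : Int))).foldl
        (fun acc p =>
          acc ++ (if p.1 = 0 then ind
                  else if PySem.Int.mod p.1 e = 0 then nl ++ ind
                  else cm) ++ pvTok p.2) acc
      = acc ++ (if data = [] then [] else if k = 0 then [] else nl)
          ++ PySem.Chars.join nl
              ((pvChunks (e.toNat - 1) data).map
                (fun c => ind ++ PySem.Chars.join cm (c.map pvTok))) := by
  have main : ∀ (n : Nat) (data : List Int), data.length ≤ n → ∀ (k : Nat) (acc : List Char),
      (PySem.List.enumerate data (e * (k : Int))).foldl
        (fun acc p =>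
          acc ++ (if p.1 = 0 then ind
                  else if PySem.Int.mod p.1 e = 0 then nl ++ ind
                  else cm) ++ pvTok p.2) acc
      = acc ++ (if data = [] then [] else if k = 0 then [] else nl)
          ++ PySem.Chars.join nl
              ((pvChunks (e.toNat - 1) data).map
                (fun c => ind ++ PySem.Chars.join cm (c.map pvTok))) := by
    intro n
    induction n with
    | zero =>
      intro data h k acc
      have : data = [] := List.eq_nil_of_length_eq_zero (Nat.le_zero.mp h)
      subst this
      simp [pvChunks, PySem.List.enumerate, PySem.Chars.join, List.intercalate]
    | succ n ih =>
      intro data h k acc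
      by_cases hnil : data = []
      · subst hnil
        simp [pvChunks, PySem.List.enumerate, PySem.Chars.join, List.intercalate]
      · have he1 : e.toNat - 1 + 1 = e.toNat := by omega
        have heN : (e.toNat : Int) = e := by omega
        obtain ⟨b0, c', hc⟩ : ∃ b0 c', data.take e.toNat = b0 :: c' := by
          cases hd : data.take e.toNat with
          | nil =>
            exfalso
            have h0 : data.take e.toNat = [] := hd
            rw [List.take_eq_nil_iff] at h0
            rcases h0 with h0 | h0
            · omega
            · exact absurd h0 hnil
          | cons a b => exact ⟨a, b, rfl⟩
        have hsplit := (List.take_append_drop e.toNat data).symm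
        conv_lhs => rw [hsplit]
        rw [PySem.List.enumerate_append, List.foldl_append]
        rw [hc, PySem.List.enumerate_cons, List.foldl_cons]
        have hhead : (if (e * (k : Int)) = 0 then ind
            else if PySem.Int.mod (e * (k : Int)) e = 0 then nl ++ ind else cm)
            = (if k = 0 then ([] : List Char) else nl) ++ ind := by
          by_cases hk : k = 0
          · subst hk; simp
          · rw [if_neg (by
                intro h0
                rcases mul_eq_zero.mp h0 with h1 | h1 <;> omega),
              if_pos ((PySem.Int.mod_eq_zero_iff_dvd _ _).mpr ⟨(k : Int), rfl⟩)]
            simp [hk]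
        rw [hhead]
        have hclen : (c'.length : Int) < e := by
          have h1 : (b0 :: c').length ≤ e.toNat := hc ▸ List.length_take_le _ _
          simp at h1; omega
        have hcond : ∀ i : Int, e * (k : Int) + 1 ≤ i → i < e * (k : Int) + 1 + (c'.length : Int) →
            ¬ (i = 0) ∧ ¬ (PySem.Int.mod i e = 0) := by
          intro i h1 h2
          have hknn : (0 : Int) ≤ (k : Int) := Int.natCast_nonneg k
          have hek : 0 ≤ e * (k : Int) := by positivity
          constructor
          · omega
          · intro hmod
            obtain ⟨m, hm⟩ := (PySem.Int.mod_eq_zero_iff_dvd _ _).mp hmod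
            have hk1 : (k : Int) < m := by nlinarith
            have hk2 : m < (k : Int) + 1 := by nlinarith
            omega
        rw [pvB_inner e ind cm nl c' (e * (k : Int) + 1) _ hcond]
        rw [pvChunks_cons _ _ hnil, he1, hc]
        by_cases hrest : data.drop e.toNat = []
        · rw [hrest]
          simp only [PySem.List.enumerate, List.foldl_nil]
          rw [pvChunks]
          rw [List.map_cons, List.map_nil, pvJoin_cons nl, List.map_cons, pvJoin_cons cm]
          simp [hnil, List.map_map, Function.comp_def, List.append_assoc]
        · obtain ⟨r1, rs, hr⟩ : ∃ r1 rs, pvChunks (e.toNat - 1) (data.drop e.toNat) = r1 :: rs :=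
            ⟨_, _, pvChunks_cons _ _ hrest⟩
          have hfull : ((b0 :: c').length : Int) = e := by
            have hgt : ¬ data.length ≤ e.toNat := fun hle => hrest (List.drop_eq_nil_of_le hle)
            have hlt : (b0 :: c').length = min e.toNat data.length := by
              rw [← hc, List.length_take]
            push_cast [hlt]
            omega
          have hstart : e * (k : Int) + ((b0 :: c').length : Int) = e * (((k + 1 : Nat)) : Int) := by
            have hk1 : (((k + 1 : Nat)) : Int) = (k : Int) + 1 := by omega
            rw [hk1, hfull]; ring
          rw [hstart]
          rw [ih (data.drop e.toNat) (by simp; omega) (k + 1) _]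
          rw [if_neg hrest, if_neg (Nat.succ_ne_zero k), hr]
          rw [show List.map (fun c => ind ++ PySem.Chars.join cm (List.map pvTok c)) (r1 :: rs)
              = (ind ++ PySem.Chars.join cm (List.map pvTok r1))
                :: List.map (fun c => ind ++ PySem.Chars.join cm (List.map pvTok c)) rs from rfl,
            show List.map (fun c => ind ++ PySem.Chars.join cm (List.map pvTok c)) ((b0 :: c') :: r1 :: rs)
              = (ind ++ PySem.Chars.join cm (List.map pvTok (b0 :: c')))
                :: (ind ++ PySem.Chars.join cm (List.map pvTok r1))
                :: List.map (fun c => ind ++ PySem.Chars.join cm (List.map pvTok c)) rs from rfl,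
            PySem.Chars.join_cons_cons,
            show List.map pvTok (b0 :: c') = pvTok b0 :: List.map pvTok c' from rfl,
            pvJoin_cons cm]
          simp [hnil, List.map_map, Function.comp_def, List.append_assoc]
  intro data k acc
  exact main data.length data le_rfl k acc

-- ===== VERDICT (by name: the statement is the Claim_ definition above) =====
theorem bytes2string_spec : Claim_equal_bytes2string := by
  intro data e il sym _ hpre
  unfold Spec_bytes2string bytes2string bytes2string_alt
  have he : 0 < e := hpre
  rw [if_neg (by omega)]
  simp only [PySem.List.foldl_append_singleton_eq_map, List.nil_append, PySem.List.len_eq]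
  have hA := pvA_chunks e he (PySem.List.pyRepeat sym.toList il) (", ".toList) data
  have hB := pvB_chunks e he (PySem.List.pyRepeat sym.toList il) (", ".toList) (",\n".toList) data 0 []
  simp only [Nat.cast_zero, mul_zero] at hB
  rw [hA]
  congr 1
  rw [hB]
  simp
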